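-- pv_equiv track=rewrite | github.com/muhammadazeemshahzad9894/skillsync | src/evaluation/metrics.py | are_roles_similar
-- ===== SOURCE A (Python) =====
-- ROLE_GROUPS = {
--     "frontend": ["Developer, front-end"],
--     "backend": ["Developer, back-end"],
--     "fullstack": ["Developer, full-stack"],
--     "mobile": ["Developer, mobile"],
--     "embedded": ["Developer, embedded applications or devices"],
--     "desktop": ["Developer, desktop or enterprise applications"],
--     "ai": ["Developer, AI", "Data scientist or machine learning specialist"],
--     "data": ["Data engineer", "Data scientist or machine learning specialist", "Data or business analyst"],
--     "devops": ["DevOps specialist", "Engineer, site reliability", "Cloud infrastructure engineer", "System administrator"],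
--     "qa": ["Developer, QA or test"],
--     "security": ["Security professional"],
--     "management": ["Product manager", "Project manager"],
--     "research": ["Research & Development role"],
-- }
--
-- def are_roles_similar(role1: str, role2: str) -> bool:
--     """
--     Check if two roles are similar or in the same family.
--     """
--     # Exact match
--     if role1.lower().strip() == role2.lower().strip():
--         return True
--
--     # Check if in same role group
--     for group, roles in ROLE_GROUPS.items():
--         roles_lower = [r.lower() for r in roles]
--         if role1.lower() in roles_lower and role2.lower() in roles_lower:
--             return True
--
--     return False
-- ===== SOURCE B (Python) =====
-- # Inverted index written directly: each lowered role name -> the set of group keys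
-- # ("frontend", "ai", ...) whose role list contains it; no scan over ROLE_GROUPS at call time.
-- _ROLE_TO_GROUPS = {
--     "developer, front-end": {"frontend"},
--     "developer, back-end": {"backend"},
--     "developer, full-stack": {"fullstack"},
--     "developer, mobile": {"mobile"},
--     "developer, embedded applications or devices": {"embedded"},
--     "developer, desktop or enterprise applications": {"desktop"},
--     "developer, ai": {"ai"},
--     "data scientist or machine learning specialist": {"ai", "data"},
--     "data engineer": {"data"},
--     "data or business analyst": {"data"},
--     "devops specialist": {"devops"},
--     "engineer, site reliability": {"devops"},
--     "cloud infrastructure engineer": {"devops"},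
--     "system administrator": {"devops"},
--     "developer, qa or test": {"qa"},
--     "security professional": {"security"},
--     "product manager": {"management"},
--     "project manager": {"management"},
--     "research & development role": {"research"},
-- }
--
-- def are_roles_similar(role1: str, role2: str) -> bool:
--     """
--     Check if two roles are similar or in the same family.
--     """
--     n1 = role1.lower()
--     n2 = role2.lower()
--     if n1.strip() == n2.strip():
--         return True
--     return bool(_ROLE_TO_GROUPS.get(n1, set()) & _ROLE_TO_GROUPS.get(n2, set()))
-- ===== Notes on version B (the rewrite author's own statement) =====
-- stated objective: alternative
-- what changed: Replaces A's per-call scan over all ROLE_GROUPS (re-lowercasing every group's role list on each call) by a hand-written module-level inverted index mapping each lowered role name to its set of group keys; a call is then two dict lookups and a set-intersection truthiness test.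
import Mathlib
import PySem

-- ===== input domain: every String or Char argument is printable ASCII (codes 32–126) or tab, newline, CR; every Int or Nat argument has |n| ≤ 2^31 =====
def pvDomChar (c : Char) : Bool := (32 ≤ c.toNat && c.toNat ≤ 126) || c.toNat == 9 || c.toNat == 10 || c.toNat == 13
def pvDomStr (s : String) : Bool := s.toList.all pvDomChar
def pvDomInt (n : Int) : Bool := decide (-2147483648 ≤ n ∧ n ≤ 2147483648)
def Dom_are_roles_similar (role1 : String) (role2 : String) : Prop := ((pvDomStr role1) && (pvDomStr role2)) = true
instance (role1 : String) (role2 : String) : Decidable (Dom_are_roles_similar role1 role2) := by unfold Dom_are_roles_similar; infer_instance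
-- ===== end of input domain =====

-- B replaces A's per-call scan over ROLE_GROUPS (re-lowercasing every group's role list)
-- by a hand-written inverted index from each lowered role name to its set of group keys;
-- a call is two dict lookups and a set-intersection truthiness test (objective: alternative).

-- ===== PORT A =====
def ROLE_GROUPS : List (String × List String) := [
  ("frontend", ["Developer, front-end"]),
  ("backend", ["Developer, back-end"]),
  ("fullstack", ["Developer, full-stack"]),
  ("mobile", ["Developer, mobile"]),
  ("embedded", ["Developer, embedded applications or devices"]),
  ("desktop", ["Developer, desktop or enterprise applications"]),
  ("ai", ["Developer, AI", "Data scientist or machine learning specialist"]),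
  ("data", ["Data engineer", "Data scientist or machine learning specialist", "Data or business analyst"]),
  ("devops", ["DevOps specialist", "Engineer, site reliability", "Cloud infrastructure engineer", "System administrator"]),
  ("qa", ["Developer, QA or test"]),
  ("security", ["Security professional"]),
  ("management", ["Product manager", "Project manager"]),
  ("research", ["Research & Development role"])]

def are_roles_similar (role1 : String) (role2 : String) : Bool :=
  if PySem.Str.strip (PySem.Str.lower role1) == PySem.Str.strip (PySem.Str.lower role2) then true
  else
    -- for group, roles in ROLE_GROUPS.items(): roles_lower = [r.lower() for r in roles];
    -- if role1.lower() in roles_lower and role2.lower() in roles_lower: return True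
    ROLE_GROUPS.any (fun p =>
      let roles_lower := p.2.map PySem.Str.lower
      roles_lower.contains (PySem.Str.lower role1) && roles_lower.contains (PySem.Str.lower role2))

-- ===== PORT B =====
-- the hand-written module-level inverted index of Source B: lowered role name -> set of group keys
def ROLE_TO_GROUPS : PySem.Dict String (PySem.Set String) := PySem.Dict.mk [
  ("developer, front-end", PySem.Set.ofList ["frontend"]),
  ("developer, back-end", PySem.Set.ofList ["backend"]),
  ("developer, full-stack", PySem.Set.ofList ["fullstack"]),
  ("developer, mobile", PySem.Set.ofList ["mobile"]),
  ("developer, embedded applications or devices", PySem.Set.ofList ["embedded"]),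
  ("developer, desktop or enterprise applications", PySem.Set.ofList ["desktop"]),
  ("developer, ai", PySem.Set.ofList ["ai"]),
  ("data scientist or machine learning specialist", PySem.Set.ofList ["ai", "data"]),
  ("data engineer", PySem.Set.ofList ["data"]),
  ("data or business analyst", PySem.Set.ofList ["data"]),
  ("devops specialist", PySem.Set.ofList ["devops"]),
  ("engineer, site reliability", PySem.Set.ofList ["devops"]),
  ("cloud infrastructure engineer", PySem.Set.ofList ["devops"]),
  ("system administrator", PySem.Set.ofList ["devops"]),
  ("developer, qa or test", PySem.Set.ofList ["qa"]),
  ("security professional", PySem.Set.ofList ["security"]),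
  ("product manager", PySem.Set.ofList ["management"]),
  ("project manager", PySem.Set.ofList ["management"]),
  ("research & development role", PySem.Set.ofList ["research"])]

def are_roles_similar_alt (role1 : String) (role2 : String) : Bool :=
  let n1 := PySem.Str.lower role1
  let n2 := PySem.Str.lower role2
  if PySem.Str.strip n1 == PySem.Str.strip n2 then true
  else
    -- bool(_ROLE_TO_GROUPS.get(n1, set()) & _ROLE_TO_GROUPS.get(n2, set()))
    !(PySem.Set.inter (ROLE_TO_GROUPS.getD n1 PySem.Set.empty)
        (ROLE_TO_GROUPS.getD n2 PySem.Set.empty)).isEmpty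

-- ===== PRECONDITION & SPEC =====
def Spec_are_roles_similar (role1 : String) (role2 : String) (out : Bool) : Prop := out = are_roles_similar_alt role1 role2
instance (role1 : String) (role2 : String) (out : Bool) : Decidable (Spec_are_roles_similar role1 role2 out) := by unfold Spec_are_roles_similar; infer_instance

-- ===== CLAIM =====
def Claim_equal_are_roles_similar : Prop := ∀ (role1 : String) (role2 : String), Dom_are_roles_similar role1 role2 → Spec_are_roles_similar role1 role2 (are_roles_similar role1 role2)

-- ===== LEMMAS AND PROOFS =====

-- the distinct lowered role names (= the keys of ROLE_TO_GROUPS, in order)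
def KEYS : List String := ["developer, front-end", "developer, back-end", "developer, full-stack", "developer, mobile", "developer, embedded applications or devices", "developer, desktop or enterprise applications", "developer, ai", "data scientist or machine learning specialist", "data engineer", "data or business analyst", "devops specialist", "engineer, site reliability", "cloud infrastructure engineer", "system administrator", "developer, qa or test", "security professional", "product manager", "project manager", "research & development role"]

lemma lower_lit_0 : PySem.Str.lower "Cloud infrastructure engineer" = "cloud infrastructure engineer" := by decide
lemma lower_lit_1 : PySem.Str.lower "Data engineer" = "data engineer" := by decide
lemma lower_lit_2 : PySem.Str.lower "Data or business analyst" = "data or business analyst" := by decide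
lemma lower_lit_3 : PySem.Str.lower "Data scientist or machine learning specialist" = "data scientist or machine learning specialist" := by decide
lemma lower_lit_4 : PySem.Str.lower "DevOps specialist" = "devops specialist" := by decide
lemma lower_lit_5 : PySem.Str.lower "Developer, AI" = "developer, ai" := by decide
lemma lower_lit_6 : PySem.Str.lower "Developer, QA or test" = "developer, qa or test" := by decide
lemma lower_lit_7 : PySem.Str.lower "Developer, back-end" = "developer, back-end" := by decide
lemma lower_lit_8 : PySem.Str.lower "Developer, desktop or enterprise applications" = "developer, desktop or enterprise applications" := by decide
lemma lower_lit_9 : PySem.Str.lower "Developer, embedded applications or devices" = "developer, embedded applications or devices" := by decide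
lemma lower_lit_10 : PySem.Str.lower "Developer, front-end" = "developer, front-end" := by decide
lemma lower_lit_11 : PySem.Str.lower "Developer, full-stack" = "developer, full-stack" := by decide
lemma lower_lit_12 : PySem.Str.lower "Developer, mobile" = "developer, mobile" := by decide
lemma lower_lit_13 : PySem.Str.lower "Engineer, site reliability" = "engineer, site reliability" := by decide
lemma lower_lit_14 : PySem.Str.lower "Product manager" = "product manager" := by decide
lemma lower_lit_15 : PySem.Str.lower "Project manager" = "project manager" := by decide
lemma lower_lit_16 : PySem.Str.lower "Research & Development role" = "research & development role" := by decide
lemma lower_lit_17 : PySem.Str.lower "Security professional" = "security professional" := by decide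
lemma lower_lit_18 : PySem.Str.lower "System administrator" = "system administrator" := by decide

-- if x names no known role, no group's lowered role list contains it
set_option maxRecDepth 8192 in
lemma nonkey_left (x : String) (hx : x ∉ KEYS) (y : String) :
    (ROLE_GROUPS.any fun p => ((p.2.map PySem.Str.lower).contains x && (p.2.map PySem.Str.lower).contains y)) = false := by
  simp only [KEYS, List.mem_cons, List.not_mem_nil, not_or, or_false] at hx
  obtain ⟨h1, h2, h3, h4, h5, h6, h7, h8, h9, h10, h11, h12, h13, h14, h15, h16, h17, h18, h19⟩ := hx
  simp [ROLE_GROUPS, Ne.symm h1, Ne.symm h2, Ne.symm h3, Ne.symm h4, Ne.symm h5, Ne.symm h6, Ne.symm h7, Ne.symm h8, Ne.symm h9, Ne.symm h10, Ne.symm h11, Ne.symm h12, Ne.symm h13, Ne.symm h14, Ne.symm h15, Ne.symm h16, Ne.symm h17, Ne.symm h18, Ne.symm h19, lower_lit_0, lower_lit_1, lower_lit_2, lower_lit_3, lower_lit_4, lower_lit_5, lower_lit_6, lower_lit_7, lower_lit_8, lower_lit_9, lower_lit_10, lower_lit_11, lower_lit_12, lower_lit_13, lower_lit_14, lower_lit_15,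 lower_lit_16, lower_lit_17, lower_lit_18]

set_option maxRecDepth 8192 in
lemma nonkey_right (y : String) (hy : y ∉ KEYS) (x : String) :
    (ROLE_GROUPS.any fun p => ((p.2.map PySem.Str.lower).contains x && (p.2.map PySem.Str.lower).contains y)) = false := by
  simp only [KEYS, List.mem_cons, List.not_mem_nil, not_or, or_false] at hy
  obtain ⟨h1, h2, h3, h4, h5, h6, h7, h8, h9, h10, h11, h12, h13, h14, h15, h16, h17, h18, h19⟩ := hy
  simp [ROLE_GROUPS, Ne.symm h1, Ne.symm h2, Ne.symm h3, Ne.symm h4, Ne.symm h5, Ne.symm h6, Ne.symm h7, Ne.symm h8, Ne.symm h9, Ne.symm h10, Ne.symm h11, Ne.symm h12, Ne.symm h13, Ne.symm h14, Ne.symm h15, Ne.symm h16, Ne.symm h17, Ne.symm h18, Ne.symm h19, lower_lit_0, lower_lit_1, lower_lit_2, lower_lit_3, lower_lit_4, lower_lit_5, lower_lit_6, lower_lit_7, lower_lit_8, lower_lit_9, lower_lit_10, lower_lit_11, lower_lit_12, lower_lit_13, lower_lit_14, lower_lit_15, lower_lit_16, lower_lit_17, lower_lit_18]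

-- if x names no known role, the index lookup defaults to the empty set
set_option maxRecDepth 8192 in
lemma nonkey_lookup (x : String) (hx : x ∉ KEYS) :
    ROLE_TO_GROUPS.getD x PySem.Set.empty = PySem.Set.empty := by
  simp only [KEYS, List.mem_cons, List.not_mem_nil, not_or, or_false] at hx
  obtain ⟨h1, h2, h3, h4, h5, h6, h7, h8, h9, h10, h11, h12, h13, h14, h15, h16, h17, h18, h19⟩ := hx
  simp [ROLE_TO_GROUPS, PySem.Dict.getD_eq_get?_getD, PySem.Dict.get?, Ne.symm h1, Ne.symm h2, Ne.symm h3, Ne.symm h4, Ne.symm h5, Ne.symm h6, Ne.symm h7, Ne.symm h8, Ne.symm h9, Ne.symm h10, Ne.symm h11, Ne.symm h12, Ne.symm h13, Ne.symm h14, Ne.symm h15, Ne.symm h16, Ne.symm h17, Ne.symm h18, Ne.symm h19]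

-- A's group scan agrees with B's index lookup + intersection truthiness, for all strings
set_option maxRecDepth 8192 in
set_option maxHeartbeats 4000000 in
lemma loop_eq_lookup (x y : String) :
    (ROLE_GROUPS.any fun p => ((p.2.map PySem.Str.lower).contains x && (p.2.map PySem.Str.lower).contains y))
    = !(PySem.Set.inter (ROLE_TO_GROUPS.getD x PySem.Set.empty) (ROLE_TO_GROUPS.getD y PySem.Set.empty)).isEmpty := by
  by_cases hx : x ∈ KEYS
  · by_cases hy : y ∈ KEYS
    · fin_cases hx <;> fin_cases hy <;> decide
    · rw [nonkey_right y hy x, nonkey_lookup y hy]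
      simp [PySem.Set.inter, PySem.Set.empty]
  · rw [nonkey_left x hx y, nonkey_lookup x hx]
    simp [PySem.Set.inter, PySem.Set.empty]

-- ===== VERDICT =====
theorem are_roles_similar_spec : Claim_equal_are_roles_similar := by
  intro role1 role2 _
  show are_roles_similar role1 role2 = are_roles_similar_alt role1 role2
  by_cases h : PySem.Str.strip (PySem.Str.lower role1) = PySem.Str.strip (PySem.Str.lower role2)
  · simp only [are_roles_similar, are_roles_similar_alt, beq_iff_eq, if_pos h]
  · simp only [are_roles_similar, are_roles_similar_alt, beq_iff_eq, if_neg h]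
    exact loop_eq_lookup _ _
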